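-- pv_equiv track=rewrite | github.com/peteroluoch/SurgiInject | engine/parser.py | get_code_stats
-- ===== SOURCE A (Python) =====
-- from typing import Dict, List, Optional, Tuple
--
-- def get_code_stats(code: str) -> Dict[str, int]:
--     """
--     Get basic statistics about the code.
--
--     Args:
--         code (str): Source code content
--
--     Returns:
--         Dict[str, int]: Code statistics
--     """
--     lines = code.split('\n')
--
--     return {
--         'total_lines': len(lines),
--         'non_empty_lines': len([line for line in lines if line.strip()]),
--         'comment_lines': len([line for line in lines if line.strip().startswith('#') or line.strip().startswith('//')]),
--         'character_count': len(code),
--         'word_count': len(code.split())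
--     }
-- ===== SOURCE B (Python) =====
-- def get_code_stats(code: str):
--     """Single character-level scan: a small state machine computes all five
--     statistics in one pass without materialising line or word lists."""
--     total = 1
--     non_empty = comments = words = 0
--     line_has = False      # current line contains a non-whitespace char
--     cstate = 0            # 0: before first non-ws of line, 1: seen '/', 2: decided
--     prev_ws = True        # previous character was whitespace (for word starts)
--     for ch in code:
--         if ch == '\n':
--             total += 1
--             if line_has:
--                 non_empty += 1
--             line_has = False
--             cstate = 0
--             prev_ws = True
--             continue
--         is_ws = ch.isspace()
--         if not is_ws:
--             if prev_ws:
--                 words += 1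
--             line_has = True
--         prev_ws = is_ws
--         if cstate == 0:
--             if not is_ws:
--                 if ch == '#':
--                     comments += 1
--                     cstate = 2
--                 elif ch == '/':
--                     cstate = 1
--                 else:
--                     cstate = 2
--         elif cstate == 1:
--             if ch == '/':
--                 comments += 1
--             cstate = 2
--     if line_has:
--         non_empty += 1
--     return {
--         'total_lines': total,
--         'non_empty_lines': non_empty,
--         'comment_lines': comments,
--         'character_count': len(code),
--         'word_count': words,
--     }
-- ===== Notes on version B (the rewrite author's own statement) =====
-- stated objective: alternative
-- what changed: Replaces split-into-lines plus three filtered comprehensions and a word split by a single character-level state machine that scans the raw string once and never materialises line or word lists.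
import Mathlib
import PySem

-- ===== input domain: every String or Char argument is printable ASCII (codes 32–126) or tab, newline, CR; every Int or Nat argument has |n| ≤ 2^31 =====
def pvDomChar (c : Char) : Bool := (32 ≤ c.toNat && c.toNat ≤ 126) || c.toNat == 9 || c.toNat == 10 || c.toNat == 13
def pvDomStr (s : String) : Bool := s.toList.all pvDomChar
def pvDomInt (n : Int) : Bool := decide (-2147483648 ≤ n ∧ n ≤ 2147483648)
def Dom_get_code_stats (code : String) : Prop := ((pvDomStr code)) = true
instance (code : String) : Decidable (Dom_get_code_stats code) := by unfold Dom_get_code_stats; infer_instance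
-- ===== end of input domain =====

-- B replaces A's split-into-lines + three filtered comprehensions + word split by ONE character-level
-- state-machine scan of the raw string that never materialises line or word lists (alternative; same asymptotic cost).

-- ===== PORT A =====
def get_code_stats (code : String) : List (String × Int) :=
  let lines := (PySem.Str.split? code "\n").getD []
  [("total_lines", PySem.List.len lines),
   ("non_empty_lines", PySem.List.len (lines.filter (fun line => !(PySem.Str.strip line == "")))),
   ("comment_lines", PySem.List.len (lines.filter (fun line =>
       PySem.Str.startswith (PySem.Str.strip line) "#" ||
       PySem.Str.startswith (PySem.Str.strip line) "//"))),
   ("character_count", PySem.Str.len code),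
   ("word_count", PySem.List.len (PySem.Str.split₀ code))]

-- ===== PORT B =====
structure PvSt where
  total : Int
  nonEmpty : Int
  comments : Int
  words : Int
  lineHas : Bool
  cstate : Nat
  prevWs : Bool
deriving DecidableEq, Repr

def pvStep (st : PvSt) (ch : Char) : PvSt :=
  if ch = '\n' then
    { st with total := st.total + 1,
              nonEmpty := if st.lineHas then st.nonEmpty + 1 else st.nonEmpty,
              lineHas := false, cstate := 0, prevWs := true }
  else
    let isWs := PySem.Chars.isspace ch
    let st1 := if !isWs then
        { st with words := if st.prevWs then st.words + 1 else st.words, lineHas := true }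
      else st
    let st2 := { st1 with prevWs := isWs }
    if st2.cstate = 0 then
      (if !isWs then
        (if ch = '#' then { st2 with comments := st2.comments + 1, cstate := 2 }
         else if ch = '/' then { st2 with cstate := 1 }
         else { st2 with cstate := 2 })
       else st2)
    else if st2.cstate = 1 then
      { st2 with comments := if ch = '/' then st2.comments + 1 else st2.comments, cstate := 2 }
    else st2

def get_code_stats_alt (code : String) : List (String × Int) :=
  let st := code.toList.foldl pvStep ⟨1, 0, 0, 0, false, 0, true⟩
  let nonEmpty := if st.lineHas then st.nonEmpty + 1 else st.nonEmpty
  [("total_lines", st.total),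
   ("non_empty_lines", nonEmpty),
   ("comment_lines", st.comments),
   ("character_count", PySem.Str.len code),
   ("word_count", st.words)]

-- ===== PRECONDITION & SPEC =====
def Spec_get_code_stats (code : String) (out : List (String × Int)) : Prop := out = get_code_stats_alt code
instance (code : String) (out : List (String × Int)) : Decidable (Spec_get_code_stats code out) := by unfold Spec_get_code_stats; infer_instance

-- ===== CLAIM (what is proved, stated in full; the proofs are below) =====
def Claim_equal_get_code_stats : Prop := ∀ (code : String), Dom_get_code_stats code → Spec_get_code_stats code (get_code_stats code)

-- ===== LEMMAS AND PROOFS =====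

-- proof-side helpers: closed recursive descriptions of what the scan computes
def pvWsp (c : Char) : Bool := PySem.Chars.isspace c

-- number of '\n' characters
def pvNL : List Char → Nat
  | [] => 0
  | c :: r => (if c = '\n' then 1 else 0) + pvNL r

-- word starts (inw = currently inside a word)
def pvW (inw : Bool) : List Char → Nat
  | [] => 0
  | c :: r => if pvWsp c then pvW false r else (if inw then 0 else 1) + pvW true r

-- prevWs flag at end
def pvP (p : Bool) : List Char → Bool
  | [] => p
  | c :: r => pvP (pvWsp c) r

-- completed non-empty lines (h = current line has a non-ws char)
def pvF (h : Bool) : List Char → Nat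
  | [] => 0
  | c :: r => if c = '\n' then (if h then 1 else 0) + pvF false r else pvF (h || !pvWsp c) r

-- lineHas flag at end
def pvH (h : Bool) : List Char → Bool
  | [] => h
  | c :: r => if c = '\n' then pvH false r else pvH (h || !pvWsp c) r

def pvCContrib (s : Nat) (c : Char) : Nat :=
  if s = 0 then (if pvWsp c then 0 else if c = '#' then 1 else 0)
  else if s = 1 then (if c = '/' then 1 else 0)
  else 0

def pvCNext (s : Nat) (c : Char) : Nat :=
  if s = 0 then (if pvWsp c then 0 else if c = '#' then 2 else if c = '/' then 1 else 2)
  else if s = 1 then 2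
  else s

-- detected comment lines
def pvC (s : Nat) : List Char → Nat
  | [] => 0
  | c :: r => if c = '\n' then pvC 0 r else pvCContrib s c + pvC (pvCNext s c) r

-- cstate at end
def pvS (s : Nat) : List Char → Nat
  | [] => s
  | c :: r => if c = '\n' then pvS 0 r else pvS (pvCNext s c) r

-- split on '\n' : (first line, remaining lines)
def pvSplit : List Char → List Char × List (List Char)
  | [] => ([], [])
  | c :: r =>
    let p := pvSplit r
    if c = '\n' then ([], p.1 :: p.2) else (c :: p.1, p.2)

-- per-line comment count of the machine started in state s
def pvLineVal (s : Nat) : List Char → Nat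
  | [] => 0
  | c :: r => pvCContrib s c + pvLineVal (pvCNext s c) r

def pvNonBlank (l : List Char) : Bool := l.any (fun c => !pvWsp c)

def pvIsComment (l : List Char) : Bool :=
  match List.dropWhile pvWsp l with
  | '#' :: _ => true
  | '/' :: '/' :: _ => true
  | _ => false

-- the scan, fully characterised
theorem pvFoldl (l : List Char) : ∀ st : PvSt,
    l.foldl pvStep st =
      ⟨st.total + (pvNL l : Int),
       st.nonEmpty + (pvF st.lineHas l : Int),
       st.comments + (pvC st.cstate l : Int),
       st.words + (pvW (!st.prevWs) l : Int),
       pvH st.lineHas l, pvS st.cstate l, pvP st.prevWs l⟩ := by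
  induction l with
  | nil => intro st; simp [pvNL, pvF, pvC, pvW, pvH, pvS, pvP]
  | cons c r ih =>
    intro st
    rw [List.foldl_cons, ih]
    by_cases hc : c = '\n'
    · subst hc
      have hws : PySem.Chars.isspace '\n' = true := by decide
      simp [pvStep, pvWsp, pvNL, pvF, pvC, pvW, pvH, pvS, pvP, hws, PvSt.mk.injEq] <;>
        first | rfl | (split_ifs <;> first | (push_cast; omega) | simp_all) | (push_cast; omega)
    · by_cases hw : PySem.Chars.isspace c
      · have hh : c ≠ '#' := by rintro rfl; revert hw; decide
        have hs : c ≠ '/' := by rintro rfl; revert hw; decide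
        by_cases h0 : st.cstate = 0
        · simp [pvStep, pvWsp, hc, hw, h0, pvNL, pvF, pvC, pvW, pvH, pvS, pvP, pvCContrib,
            pvCNext, hh, hs, PvSt.mk.injEq] <;>
            first | rfl | (split_ifs <;> first | (push_cast; omega) | simp_all) | (push_cast; omega)
        · by_cases h1 : st.cstate = 1
          · simp [pvStep, pvWsp, hc, hw, h0, h1, pvNL, pvF, pvC, pvW, pvH, pvS, pvP, pvCContrib,
              pvCNext, hs, PvSt.mk.injEq] <;>
              first | rfl | (split_ifs <;> first | (push_cast; omega) | simp_all) | (push_cast; omega)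
          · simp [pvStep, pvWsp, hc, hw, h0, h1, pvNL, pvF, pvC, pvW, pvH, pvS, pvP, pvCContrib,
              pvCNext, PvSt.mk.injEq] <;>
              first | rfl | (split_ifs <;> first | (push_cast; omega) | simp_all) | (push_cast; omega)
      · by_cases h0 : st.cstate = 0
        · by_cases hh : c = '#'
          · subst hh
            simp [pvStep, pvWsp, hc, hw, h0, pvNL, pvF, pvC, pvW, pvH, pvS, pvP, pvCContrib,
              pvCNext, PvSt.mk.injEq] <;>
              first | rfl | (split_ifs <;> first | (push_cast; omega) | simp_all) | (push_cast; omega)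
          · by_cases hs : c = '/'
            · subst hs
              simp [pvStep, pvWsp, hc, hw, h0, pvNL, pvF, pvC, pvW, pvH, pvS, pvP, pvCContrib,
                pvCNext, PvSt.mk.injEq] <;>
                first | rfl | (split_ifs <;> first | (push_cast; omega) | simp_all) | (push_cast; omega)
            · simp [pvStep, pvWsp, hc, hw, h0, hh, hs, pvNL, pvF, pvC, pvW, pvH, pvS, pvP,
                pvCContrib, pvCNext, PvSt.mk.injEq] <;>
                first | rfl | (split_ifs <;> first | (push_cast; omega) | simp_all) | (push_cast; omega)
        · by_cases h1 : st.cstate = 1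
          · by_cases hs : c = '/'
            · subst hs
              simp [pvStep, pvWsp, hc, hw, h0, h1, pvNL, pvF, pvC, pvW, pvH, pvS, pvP,
                pvCContrib, pvCNext, PvSt.mk.injEq] <;>
                first | rfl | (split_ifs <;> first | (push_cast; omega) | simp_all) | (push_cast; omega)
            · simp [pvStep, pvWsp, hc, hw, h0, h1, hs, pvNL, pvF, pvC, pvW, pvH, pvS, pvP,
                pvCContrib, pvCNext, PvSt.mk.injEq] <;>
                first | rfl | (split_ifs <;> first | (push_cast; omega) | simp_all) | (push_cast; omega)
          · simp [pvStep, pvWsp, hc, hw, h0, h1, pvNL, pvF, pvC, pvW, pvH, pvS, pvP,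
              pvCContrib, pvCNext, PvSt.mk.injEq] <;>
              first | rfl | (split_ifs <;> first | (push_cast; omega) | simp_all) | (push_cast; omega)

theorem pvGo (l : List Char) : ∀ (fuel : Nat), l.length < fuel → ∀ (cur : List Char) (acc : List (List Char)),
    PySem.Chars.splitOn.go ['\n'] fuel l cur acc
      = acc.reverse ++ (cur.reverse ++ (pvSplit l).1) :: (pvSplit l).2 := by
  induction l with
  | nil =>
    intro fuel hf cur acc
    obtain ⟨f, rfl⟩ : ∃ f, fuel = f + 1 := ⟨fuel - 1, by omega⟩
    simp [PySem.Chars.splitOn.go, pvSplit]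
  | cons c r ih =>
    intro fuel hf cur acc
    obtain ⟨f, rfl⟩ : ∃ f, fuel = f + 1 := ⟨fuel - 1, by omega⟩
    rw [PySem.Chars.splitOn.go]
    by_cases hc : c = '\n'
    · subst hc
      simp only [List.isPrefixOf, BEq.rfl, Bool.true_and, if_true, List.length_cons,
        List.length_nil, List.drop_succ_cons, List.drop_zero]
      rw [ih f (by simp at hf; omega) [] (cur.reverse :: acc)]
      simp [pvSplit]
    · have : ('\n' == c) = false := by simp [BEq.symm_false]; exact fun h => hc h.symm
      simp only [List.isPrefixOf, this, Bool.false_and, if_false]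
      rw [ih f (by simp at hf; omega) (c :: cur) acc]
      simp [pvSplit, hc]
theorem pvSplitOn_eq (l : List Char) :
    PySem.Chars.splitOn l ['\n'] = (pvSplit l).1 :: (pvSplit l).2 := by
  unfold PySem.Chars.splitOn
  rw [pvGo l (l.length + 1) (by omega) [] []]
  simp

theorem pvGo0 (l : List Char) : ∀ (cur : List Char) (acc : List (List Char)),
    (PySem.Chars.split₀.go l cur acc).length
      = acc.length + (if cur.isEmpty then 0 else 1) + pvW (!cur.isEmpty) l := by
  induction l with
  | nil => intro cur acc; by_cases h : cur.isEmpty <;> simp [PySem.Chars.split₀.go, h, pvW]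
  | cons c r ih =>
    intro cur acc
    rw [PySem.Chars.split₀.go]
    by_cases hw : PySem.Chars.isspace c
    · by_cases h : cur.isEmpty <;> simp [hw, h, ih, pvW, pvWsp] <;> omega
    · by_cases h : cur.isEmpty <;> simp [hw, h, ih, pvW, pvWsp] <;> omega
theorem pvW_split₀ (l : List Char) : (PySem.Chars.split₀ l).length = pvW false l := by
  unfold PySem.Chars.split₀
  rw [pvGo0]
  simp

theorem pvFH (l : List Char) : ∀ h : Bool,
    pvF h l + (if pvH h l then 1 else 0) =
      (if h || pvNonBlank (pvSplit l).1 then 1 else 0) + ((pvSplit l).2.countP pvNonBlank) := by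
  induction l with
  | nil => intro h; simp [pvF, pvH, pvSplit, pvNonBlank]
  | cons c r ih =>
    intro h
    by_cases hc : c = '\n'
    · subst hc
      have h2 := ih false
      simp only [Bool.false_or] at h2
      simp [pvF, pvH, pvSplit, pvNonBlank, List.countP_cons] at h2 ⊢
      omega
    · simp only [pvF, pvH, pvSplit, if_neg hc]
      rw [ih (h || !pvWsp c)]
      simp [pvNonBlank, Bool.or_assoc]
theorem pvC_lines (l : List Char) : ∀ s : Nat,
    pvC s l = pvLineVal s (pvSplit l).1 + ((pvSplit l).2.map (pvLineVal 0)).sum := by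
  induction l with
  | nil => intro s; simp [pvC, pvSplit, pvLineVal]
  | cons c r ih =>
    intro s
    by_cases hc : c = '\n'
    · subst hc
      simp [pvC, pvSplit, pvLineVal, ih 0]
    · simp [pvC, pvSplit, pvLineVal, hc, ih (pvCNext s c)]
      omega

theorem pvLineVal_two (l : List Char) : pvLineVal 2 l = 0 := by
  induction l with
  | nil => simp [pvLineVal]
  | cons c r ih => simp [pvLineVal, pvCContrib, pvCNext, ih]

theorem pvLineVal_one (l : List Char) :
    pvLineVal 1 l = (if l.head? = some '/' then 1 else 0) := by
  cases l with
  | nil => simp [pvLineVal]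
  | cons c r =>
    by_cases hc : c = '/' <;>
      simp [pvLineVal, pvCContrib, pvCNext, pvLineVal_two, hc]

theorem pvLineVal_zero (l : List Char) : pvLineVal 0 l = (if pvIsComment l then 1 else 0) := by
  induction l with
  | nil => simp [pvLineVal, pvIsComment]
  | cons c r ih =>
    by_cases hw : pvWsp c
    · have h1 : c ≠ '#' := by rintro rfl; revert hw; decide
      have h2 : c ≠ '/' := by rintro rfl; revert hw; decide
      simp [pvLineVal, pvCContrib, pvCNext, hw, ih, pvIsComment, List.dropWhile_cons]
    · by_cases h1 : c = '#'
      · subst h1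
        simp [pvLineVal, pvCContrib, pvCNext, pvLineVal_two, pvIsComment, List.dropWhile_cons, hw]
      · by_cases h2 : c = '/'
        · subst h2
          simp only [pvLineVal, pvCContrib, pvCNext, hw, pvLineVal_one, pvIsComment,
            List.dropWhile_cons, if_neg h1]
          simp [hw]
          cases r with
          | nil => simp [pvLineVal_one]
          | cons d r' => by_cases hd : d = '/' <;> simp [pvLineVal_one, hd]
        · simp [pvLineVal, pvCContrib, pvCNext, hw, h1, h2, pvLineVal_two, pvIsComment,
            List.dropWhile_cons]
theorem pvRstrip_eq_nil_iff (x : List Char) :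
    PySem.Chars.rstrip x = [] ↔ ∀ c ∈ x, PySem.Chars.isspace c = true := by
  simp [PySem.Chars.rstrip, List.dropWhile_eq_nil_iff]

theorem pvStrip_empty (l : List Char) : PySem.Chars.strip l = [] ↔ pvNonBlank l = false := by
  unfold PySem.Chars.strip PySem.Chars.lstrip
  rw [pvRstrip_eq_nil_iff]
  simp [pvNonBlank, pvWsp]
  constructor
  · intro h c hc
    have hc' : c ∈ List.takeWhile PySem.Chars.isspace l ++ List.dropWhile PySem.Chars.isspace l := by
      rw [List.takeWhile_append_dropWhile]; exact hc
    rcases List.mem_append.mp hc' with h1 | h1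
    · exact List.mem_takeWhile_imp h1
    · exact h c h1
  · intro h c hc
    exact h c (List.dropWhile_sublist _ |>.subset hc)

theorem pvRstrip_cons (c : Char) (r : List Char) (hc : PySem.Chars.isspace c = false) :
    PySem.Chars.rstrip (c :: r) = c :: PySem.Chars.rstrip r := by
  unfold PySem.Chars.rstrip
  rw [List.reverse_cons, List.dropWhile_append]
  by_cases h : (List.dropWhile PySem.Chars.isspace r.reverse).isEmpty
  · simp [h, hc, List.isEmpty_iff.mp h]
  · simp [h]

theorem pvRstrip_prefix (x : List Char) : PySem.Chars.rstrip x <+: x := by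
  unfold PySem.Chars.rstrip
  have := List.dropWhile_suffix (l := x.reverse) (p := PySem.Chars.isspace)
  exact List.reverse_suffix.mp (by simpa using this)
theorem pvHead_rstrip_slash (r : List Char) :
    (['/'].isPrefixOf (PySem.Chars.rstrip r)) = (r.head? == some '/') := by
  cases r with
  | nil => simp [PySem.Chars.rstrip]
  | cons x r2 =>
    by_cases hx : x = '/'
    · subst hx
      rw [pvRstrip_cons _ _ (by decide)]
      simp [List.isPrefixOf]
    · cases h : PySem.Chars.rstrip (x :: r2) with
      | nil => simp [List.isPrefixOf, Option.ext_iff, hx]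
      | cons y t =>
        have hp := pvRstrip_prefix (x :: r2)
        rw [h] at hp
        obtain ⟨t', ht⟩ := hp
        have hyx : y = x := by
          have := ht
          simp at this
          exact this.1
        subst hyx
        simp [List.isPrefixOf, hx]
        exact fun h => hx h.symm

theorem pvComment_pred (l : List Char) :
    (PySem.Chars.startswith (PySem.Chars.strip l) ['#'] ||
     PySem.Chars.startswith (PySem.Chars.strip l) ['/', '/']) = pvIsComment l := by
  unfold PySem.Chars.strip PySem.Chars.lstrip PySem.Chars.startswith pvIsComment
  simp only [show pvWsp = PySem.Chars.isspace from rfl]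
  cases hd : List.dropWhile PySem.Chars.isspace l with
  | nil => simp [PySem.Chars.rstrip, List.isPrefixOf]
  | cons c r =>
    have hcw : PySem.Chars.isspace c = false := by
      have h2 := List.head?_dropWhile_not PySem.Chars.isspace l
      rw [hd] at h2
      simpa using h2
    rw [pvRstrip_cons c r hcw]
    by_cases h1 : c = '#'
    · subst h1; simp [List.isPrefixOf]
    · by_cases h2 : c = '/'
      · subst h2
        simp only [List.isPrefixOf, List.isPrefixOf_nil_left, Bool.and_true, BEq.rfl,
          Bool.true_and, pvHead_rstrip_slash]
        cases r with
        | nil => simp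
        | cons d r' => by_cases hdd : d = '/' <;> simp [hdd] <;> simp [BEq.symm_false, hdd]
      · have e1 : ('#' == c) = false := by simp; exact fun h => h1 h.symm
        have e2 : ('/' == c) = false := by simp; exact fun h => h2 h.symm
        simp [List.isPrefixOf, e1, e2, h1, h2]



theorem pvSplit_snd_length (l : List Char) : (pvSplit l).2.length = pvNL l := by
  induction l with
  | nil => simp [pvSplit, pvNL]
  | cons c r ih => by_cases hc : c = '\n' <;> simp [pvSplit, pvNL, hc, ih] <;> omega

theorem pvSum_countP (ls : List (List Char)) :
    (ls.map (pvLineVal 0)).sum = ls.countP pvIsComment := by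
  induction ls with
  | nil => rfl
  | cons a t ih =>
    simp [pvLineVal_zero, List.countP_cons, ih]
    split <;> omega

theorem pvStr_empty_beq (s : String) : (s == "") = s.toList.isEmpty := by
  rw [Bool.eq_iff_iff, beq_iff_eq, List.isEmpty_iff, ← String.toList_inj]
  rfl

theorem pvPred_nonblank (l : List Char) :
    (!(PySem.Str.strip (String.ofList l) == "")) = pvNonBlank l := by
  rw [pvStr_empty_beq, PySem.Str.toList_strip, String.toList_ofList]
  cases h : pvNonBlank l
  · simp [List.isEmpty_iff, (pvStrip_empty l).mpr h]
  · have : ¬ PySem.Chars.strip l = [] := fun he => by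
      rw [(pvStrip_empty l).mp he] at h; cases h
    simp [List.isEmpty_iff, this]

theorem pvPred_comment (l : List Char) :
    (PySem.Str.startswith (PySem.Str.strip (String.ofList l)) "#" ||
     PySem.Str.startswith (PySem.Str.strip (String.ofList l)) "//") = pvIsComment l := by
  rw [PySem.Str.startswith_eq, PySem.Str.startswith_eq, PySem.Str.toList_strip,
    String.toList_ofList]
  exact pvComment_pred l

-- ===== VERDICT (by name: the statement is the Claim_ definition above) =====
theorem get_code_stats_spec : Claim_equal_get_code_stats := by
  intro code _
  unfold Spec_get_code_stats get_code_stats get_code_stats_alt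
  rw [pvFoldl]
  have hsplit : (PySem.Str.split? code "\n").getD [] = ((pvSplit code.toList).1 :: (pvSplit code.toList).2).map String.ofList := by
    simp [PySem.Str.split?, PySem.Chars.split?]
    rw [pvSplitOn_eq]
    simp
  rw [hsplit]
  simp only [PySem.List.len_eq, List.filter_map, List.length_map, List.length_cons,
    Function.comp_def, pvPred_nonblank, pvPred_comment]
  have hFH := pvFH code.toList false
  simp only [Bool.false_or] at hFH
  have hC := pvC_lines code.toList 0
  simp only [List.cons.injEq, Prod.mk.injEq, true_and, and_true]
  refine ⟨?_, ?_, ?_, ?_⟩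
  · rw [pvSplit_snd_length]; push_cast; ring
  · rw [← List.countP_eq_length_filter, List.countP_cons]
    have e1 : List.countP (fun x => pvNonBlank x) (pvSplit code.toList).2
        = List.countP pvNonBlank (pvSplit code.toList).2 := rfl
    rw [e1]
    by_cases hH : pvH false code.toList <;>
      by_cases hNB : pvNonBlank (pvSplit code.toList).1 <;>
        simp [hH, hNB] at hFH ⊢ <;> push_cast <;> omega
  · rw [← List.countP_eq_length_filter, List.countP_cons, hC, pvLineVal_zero, pvSum_countP]
    have e2 : List.countP (fun x => pvIsComment x) (pvSplit code.toList).2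
        = List.countP pvIsComment (pvSplit code.toList).2 := rfl
    rw [e2]
    by_cases hIC : pvIsComment (pvSplit code.toList).1 <;>
      simp [hIC] <;> push_cast <;> omega
  · simp [PySem.Str.split₀, pvW_split₀]
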